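-- pv_equiv track=rewrite | github.com/alp-oz/kcore-chain | diamond.py | _is_core
-- ===== SOURCE A (Python) =====
-- def _is_core(kappa: tuple[int, ...], k: int) -> bool:
--     """True iff kappa has no cell with hook length exactly k+1."""
--     n = len(kappa)
--     for i in range(n):
--         for j in range(kappa[i]):
--             arm = kappa[i] - j - 1
--             leg = sum(1 for r in range(i + 1, n) if kappa[r] > j)
--             if arm + leg + 1 == k + 1:
--                 return False
--     return True
-- ===== SOURCE B (Python) =====
-- def _is_core(kappa, k):
--     """True iff kappa has no cell with hook length exactly k+1."""
--     below = []  # positive row lengths strictly below the current row, sorted descending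
--     for m in reversed(kappa):
--         t = len(below)
--         # a cell (column j) of this row has hook k+1 iff j = m-1-k+leg where
--         # leg = #(rows below longer than j); guess leg, then verify it in O(1)
--         for leg in range(t + 1):
--             j = m - 1 - k + leg
--             if 0 <= j < m and (leg == t or below[leg] <= j) and (leg == 0 or below[leg - 1] > j):
--                 return False
--         if m > 0:
--             i = 0
--             while i < t and below[i] >= m:
--                 i += 1
--             below.insert(i, m)
--     return True
-- ===== Notes on version B (the rewrite author's own statement) =====
-- stated objective: faster
-- what changed: Instead of recomputing each cell's leg by scanning all lower rows, B sweeps the partition bottom-up maintaining the conjugate-count array, so every leg is an O(1) lookup.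
import Mathlib
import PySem

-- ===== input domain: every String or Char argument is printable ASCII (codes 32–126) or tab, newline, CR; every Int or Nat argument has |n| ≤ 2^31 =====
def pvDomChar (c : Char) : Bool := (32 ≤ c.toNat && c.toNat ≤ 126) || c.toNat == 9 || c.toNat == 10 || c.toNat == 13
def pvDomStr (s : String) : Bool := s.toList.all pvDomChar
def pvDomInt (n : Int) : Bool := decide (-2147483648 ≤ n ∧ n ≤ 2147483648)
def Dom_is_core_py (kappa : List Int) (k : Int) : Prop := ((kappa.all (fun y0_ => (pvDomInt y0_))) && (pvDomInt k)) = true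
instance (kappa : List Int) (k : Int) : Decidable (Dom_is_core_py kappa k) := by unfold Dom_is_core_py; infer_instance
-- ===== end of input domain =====

-- B replaces A's per-cell scan of the lower rows by a bottom-up sweep that keeps the lower
-- row lengths sorted, guessing the leg of a hook-(k+1) cell and verifying it in O(1) per guess.

-- ===== PORT A =====
-- leg = sum(1 for r in range(i + 1, n) if kappa[r] > j): the index range i+1..n-1
-- covers exactly the suffix of kappa below row i, ported as a fold over that suffix.
def aLeg (j : Int) (rest : List Int) : Int :=
  rest.foldl (fun acc r => if r > j then acc + 1 else acc) 0

-- body of the outer loop for one row of length m, rest = rows below it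
def aRow (m k : Int) (rest : List Int) : Bool :=
  (PySem.List.pyRange 0 m 1).all fun j =>
    let arm := m - j - 1
    let leg := aLeg j rest
    !(arm + leg + 1 == k + 1)

-- for i in range(n): row kappa[i] with suffix kappa[i+1:]; early `return False` = short-circuit &&
def aGo (k : Int) : List Int → Bool
  | [] => true
  | m :: rest => aRow m k rest && aGo k rest

def is_core_py (kappa : List Int) (k : Int) : Bool := aGo k kappa

-- ===== PORT B =====
-- `leg == 0 or below[leg-1] > j`: prev carries below[leg-1] (none while leg == 0)
def bPrevOk : Option Int → Int → Bool
  | none, _ => true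
  | some p, j => decide (p > j)

-- inner loop `for leg in range(t+1)` walking the sorted list below; the head is
-- below[leg]; returning true = the Python `return False`
def bCheck (m k : Int) : Option Int → Int → List Int → Bool
  | prev, leg, [] =>
    let j := m - 1 - k + leg
    decide (0 ≤ j ∧ j < m) && bPrevOk prev j
  | prev, leg, c :: rest =>
    let j := m - 1 - k + leg
    if (0 ≤ j ∧ j < m) ∧ c ≤ j ∧ bPrevOk prev j = true then true
    else bCheck m k (some c) (leg + 1) rest

-- the `while i < t and below[i] >= m` scan + `below.insert(i, m)`
def bInsert (m : Int) : List Int → List Int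
  | [] => [m]
  | c :: rest => if c ≥ m then c :: bInsert m rest else m :: c :: rest

-- for m in reversed(kappa)
def bGo (k : Int) : List Int → List Int → Bool
  | [], _ => true
  | m :: rest, below =>
    if bCheck m k none 0 below then false
    else bGo k rest (if m > 0 then bInsert m below else below)

def is_core_py_alt (kappa : List Int) (k : Int) : Bool := bGo k kappa.reverse []

-- ===== PRECONDITION & SPEC =====
def Spec_is_core_py (kappa : List Int) (k : Int) (out : Bool) : Prop := out = is_core_py_alt kappa k
instance (kappa : List Int) (k : Int) (out : Bool) : Decidable (Spec_is_core_py kappa k out) := by unfold Spec_is_core_py; infer_instance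

-- ===== CLAIM (what is proved, stated in full; the proofs are below) =====
def Claim_equal_is_core_py : Prop := ∀ (kappa : List Int) (k : Int), Dom_is_core_py kappa k → Spec_is_core_py kappa k (is_core_py kappa k)

-- ===== LEMMAS AND PROOFS =====

-- number of rows in `rows` whose length exceeds j (the leg contributed by `rows`)
def cnt (rows : List Int) (j : Int) : Int := (rows.countP (fun r => decide (j < r)) : Int)

lemma cnt_nil (j : Int) : cnt [] j = 0 := rfl

lemma cnt_cons (m : Int) (rows : List Int) (j : Int) :
    cnt (m :: rows) j = (if j < m then 1 else 0) + cnt rows j := by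
  simp [cnt, List.countP_cons]
  split_ifs <;> omega

lemma cnt_nonneg (rows : List Int) (j : Int) : 0 ≤ cnt rows j := by
  simp only [cnt]; exact Int.natCast_nonneg _

lemma cnt_le_length (rows : List Int) (j : Int) : cnt rows j ≤ rows.length := by
  have := List.countP_le_length (l := rows) (p := fun r => decide (j < r))
  simp only [cnt]
  exact_mod_cast this

lemma aLeg_fold (j : Int) : ∀ (rest : List Int) (a : Int),
    rest.foldl (fun acc r => if r > j then acc + 1 else acc) a = a + cnt rest j := by
  intro rest
  induction rest with
  | nil => intro a; simp [cnt_nil]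
  | cons r rs ih =>
    intro a
    simp only [List.foldl_cons, ih, cnt_cons]
    split_ifs <;> ring

lemma aLeg_eq_cnt (j : Int) (rest : List Int) : aLeg j rest = cnt rest j := by
  simpa using aLeg_fold j rest 0

lemma aRow_iff (m k : Int) (rows : List Int) :
    aRow m k rows = true ↔ ∀ j : Int, 0 ≤ j → j < m → ¬ (m - j - 1 + cnt rows j + 1 = k + 1) := by
  simp [aRow, List.all_eq_true, PySem.List.mem_pyRange_one, aLeg_eq_cnt, and_imp]

lemma cnt_eq_zero_of_sorted_le (c j : Int) (rest : List Int)
    (hs : (c :: rest).Pairwise (· ≥ ·)) (hc : c ≤ j) : cnt (c :: rest) j = 0 := by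
  have hall : ∀ x ∈ rest, c ≥ x := fun x hx => List.rel_of_pairwise_cons hs hx
  simp only [cnt]
  rw [List.countP_eq_zero.mpr]
  · rfl
  · intro x hx
    rcases List.mem_cons.mp hx with h | h
    · subst h; simpa using (by omega : ¬ j < x)
    · have hcx := hall x h
      simpa using (by omega : ¬ j < x)

lemma bCheck_iff (m k : Int) : ∀ (l : List Int) (prev : Option Int) (leg : Int),
    l.Pairwise (· ≥ ·) →
    (bCheck m k prev leg l = true ↔
      ∃ d : Nat, d ≤ l.length ∧ 0 ≤ m - 1 - k + leg + d ∧ m - 1 - k + leg + d < m ∧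
        cnt l (m - 1 - k + leg + d) = d ∧
        (d = 0 → bPrevOk prev (m - 1 - k + leg) = true)) := by
  intro l
  induction l with
  | nil =>
    intro prev leg _
    simp only [bCheck, Bool.and_eq_true, decide_eq_true_eq]
    constructor
    · rintro ⟨⟨h1, h2⟩, h3⟩
      exact ⟨0, by simp, by simpa using h1, by simpa using h2, by simp [cnt_nil], fun _ => h3⟩
    · rintro ⟨d, hd, h1, h2, _, hp⟩
      have hd0 : d = 0 := by simpa using hd
      subst hd0
      exact ⟨⟨by simpa using h1, by simpa using h2⟩, hp rfl⟩
  | cons c rest ih =>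
    intro prev leg hs
    have hrest : rest.Pairwise (· ≥ ·) := hs.of_cons
    have hall : ∀ x ∈ rest, c ≥ x := fun x hx => List.rel_of_pairwise_cons hs hx
    show (if (0 ≤ m - 1 - k + leg ∧ m - 1 - k + leg < m) ∧ c ≤ m - 1 - k + leg ∧
            bPrevOk prev (m - 1 - k + leg) = true then true
          else bCheck m k (some c) (leg + 1) rest) = true ↔ _
    by_cases hcond : (0 ≤ m - 1 - k + leg ∧ m - 1 - k + leg < m) ∧ c ≤ m - 1 - k + leg ∧
        bPrevOk prev (m - 1 - k + leg) = true
    · rw [if_pos hcond]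
      obtain ⟨⟨h1, h2⟩, hc, hp⟩ := hcond
      constructor
      · intro _
        exact ⟨0, by simp, by simpa using h1, by simpa using h2,
          by simpa using cnt_eq_zero_of_sorted_le c (m - 1 - k + leg) rest hs hc,
          fun _ => hp⟩
      · intro _; rfl
    · rw [if_neg hcond]
      rw [ih (some c) (leg + 1) hrest]
      constructor
      · rintro ⟨d', hd', h1', h2', hc', hp'⟩
        refine ⟨d' + 1, by simpa using Nat.succ_le_succ hd', by push_cast at h1' ⊢; omega,
          by push_cast at h2' ⊢; omega, ?_, by omega⟩
        have hj : m - 1 - k + leg + ((d' : Int) + 1) = m - 1 - k + (leg + 1) + d' := by ring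
        push_cast
        rw [hj, cnt_cons]
        have hcgt : m - 1 - k + (leg + 1) + (d' : Int) < c := by
          cases Nat.eq_zero_or_pos d' with
          | inl h0 =>
            subst h0
            have hph := hp' rfl
            simp only [bPrevOk, decide_eq_true_eq] at hph
            push_cast
            omega
          | inr hpos =>
            have : 0 < cnt rest (m - 1 - k + (leg + 1) + (d' : Int)) := by
              rw [hc']; exact_mod_cast hpos
            have hcp : 0 < rest.countP (fun r => decide ((m - 1 - k + (leg + 1) + (d' : Int)) < r)) := by
              simp only [cnt] at this; exact_mod_cast this
            obtain ⟨x, hx, hxg⟩ := List.countP_pos_iff.mp hcp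
            have hcx := hall x hx
            simp only [decide_eq_true_eq] at hxg
            omega
        rw [if_pos hcgt, hc']
        ring
      · rintro ⟨d, hd, h1, h2, hc, hp⟩
        cases d with
        | zero =>
          exfalso
          apply hcond
          refine ⟨⟨by simpa using h1, by simpa using h2⟩, ?_, hp rfl⟩
          by_contra hcle
          push Not at hcle
          have hc0 : cnt (c :: rest) (m - 1 - k + leg) = 0 := by simpa using hc
          rw [cnt_cons, if_pos hcle] at hc0
          have := cnt_nonneg rest (m - 1 - k + leg)
          omega
        | succ d' =>
          have hj : m - 1 - k + leg + ((d' : Int) + 1) = m - 1 - k + (leg + 1) + d' := by ring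
          push_cast at hc h1 h2
          rw [hj] at hc h1 h2
          have hcgt : m - 1 - k + (leg + 1) + (d' : Int) < c := by
            by_contra hcle
            push Not at hcle
            have := cnt_eq_zero_of_sorted_le c _ rest hs hcle
            rw [this] at hc
            omega
          rw [cnt_cons, if_pos hcgt] at hc
          refine ⟨d', by simpa using hd, by omega, by omega, by omega, ?_⟩
          intro hd0
          subst hd0
          simp only [bPrevOk, decide_eq_true_eq]
          simpa using hcgt

lemma bCheck_bad (m k : Int) (below rows : List Int)
    (hs : below.Pairwise (· ≥ ·)) (hcnt : ∀ j : Int, 0 ≤ j → cnt below j = cnt rows j) :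
    (bCheck m k none 0 below = true ↔
      ∃ j : Int, 0 ≤ j ∧ j < m ∧ m - j - 1 + cnt rows j + 1 = k + 1) := by
  rw [bCheck_iff m k below none 0 hs]
  constructor
  · rintro ⟨d, hd, h1, h2, hc, -⟩
    refine ⟨m - 1 - k + 0 + d, by omega, by omega, ?_⟩
    rw [← hcnt _ (by omega), hc]
    ring
  · rintro ⟨j, hj0, hjm, hjeq⟩
    have hcnt' : cnt below j = cnt rows j := hcnt j hj0
    have hnn : 0 ≤ cnt below j := cnt_nonneg below j
    refine ⟨(cnt below j).toNat, ?_, ?_, ?_, ?_, fun _ => rfl⟩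
    · have := cnt_le_length below j
      omega
    · have hjv : m - 1 - k + 0 + ((cnt below j).toNat : Int) = j := by omega
      omega
    · have hjv : m - 1 - k + 0 + ((cnt below j).toNat : Int) = j := by omega
      omega
    · have hjv : m - 1 - k + 0 + ((cnt below j).toNat : Int) = j := by omega
      rw [hjv]
      omega

lemma mem_bInsert (m : Int) : ∀ (l : List Int) (x : Int), x ∈ bInsert m l → x = m ∨ x ∈ l := by
  intro l
  induction l with
  | nil => intro x hx; left; simpa [bInsert] using hx
  | cons c rest ih =>
    intro x hx
    show x = m ∨ x ∈ c :: rest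
    simp only [bInsert] at hx
    split_ifs at hx with hb
    · rcases List.mem_cons.mp hx with h | h
      · right; simp [h]
      · rcases ih x h with h' | h'
        · left; exact h'
        · right; simp [h']
    · rcases List.mem_cons.mp hx with h | h
      · left; exact h
      · right; exact h

lemma sorted_bInsert (m : Int) : ∀ (l : List Int), l.Pairwise (· ≥ ·) →
    (bInsert m l).Pairwise (· ≥ ·) := by
  intro l
  induction l with
  | nil => intro _; simp [bInsert]
  | cons c rest ih =>
    intro hs
    have hall : ∀ x ∈ rest, c ≥ x := fun x hx => List.rel_of_pairwise_cons hs hx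
    have hrest : rest.Pairwise (· ≥ ·) := hs.of_cons
    show (if c ≥ m then c :: bInsert m rest else m :: c :: rest).Pairwise (· ≥ ·)
    split_ifs with hc
    · rw [List.pairwise_cons]
      refine ⟨?_, ih hrest⟩
      intro x hx
      rcases mem_bInsert m rest x hx with h | h
      · omega
      · exact hall x h
    · rw [List.pairwise_cons]
      refine ⟨?_, hs⟩
      intro x hx
      rcases List.mem_cons.mp hx with h | h
      · omega
      · have hcx := hall x h; omega

lemma cnt_bInsert (m : Int) : ∀ (l : List Int) (j : Int),
    cnt (bInsert m l) j = (if j < m then 1 else 0) + cnt l j := by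
  intro l
  induction l with
  | nil => intro j; simp only [bInsert]; rw [cnt_cons, cnt_nil]
  | cons c rest ih =>
    intro j
    show cnt (if c ≥ m then c :: bInsert m rest else m :: c :: rest) j = _
    by_cases hc : c ≥ m
    · rw [if_pos hc, cnt_cons, ih j, cnt_cons]
      ring
    · rw [if_neg hc, cnt_cons]

-- A's recursion, generalized with extra rows `rows` lying below the whole of kappa
def aGoX (k : Int) : List Int → List Int → Bool
  | [], _ => true
  | m :: rest, rows => aRow m k (rest ++ rows) && aGoX k rest rows

lemma aGoX_concat (k m : Int) : ∀ (ys rows : List Int),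
    aGoX k (ys ++ [m]) rows = (aGoX k ys (m :: rows) && aRow m k rows) := by
  intro ys
  induction ys with
  | nil => intro rows; simp [aGoX]
  | cons y ys ih =>
    intro rows
    have hl : (ys ++ [m]) ++ rows = ys ++ (m :: rows) := by simp
    simp only [List.cons_append, aGoX, ih, hl, Bool.and_assoc]

lemma aGoX_nil_rows (k : Int) : ∀ kappa : List Int, aGoX k kappa [] = aGo k kappa := by
  intro kappa
  induction kappa with
  | nil => rfl
  | cons m rest ih => simp only [aGoX, aGo, List.append_nil, ih]

lemma bGo_main (k : Int) : ∀ (kappa rows below : List Int),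
    below.Pairwise (· ≥ ·) → (∀ j : Int, 0 ≤ j → cnt below j = cnt rows j) →
    bGo k kappa.reverse below = aGoX k kappa rows := by
  intro kappa
  induction kappa using List.reverseRecOn with
  | nil => intro rows below _ _; rfl
  | append_singleton ys m ih =>
    intro rows below hs hcnt
    rw [List.reverse_append, List.reverse_singleton, List.singleton_append]
    show (if bCheck m k none 0 below then false
          else bGo k ys.reverse (if m > 0 then bInsert m below else below)) = _
    rw [aGoX_concat]
    by_cases hbad : ∃ j : Int, 0 ≤ j ∧ j < m ∧ m - j - 1 + cnt rows j + 1 = k + 1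
    · rw [if_pos ((bCheck_bad m k below rows hs hcnt).mpr hbad)]
      obtain ⟨j, hj0, hjm, hjeq⟩ := hbad
      have hrow : aRow m k rows = false := by
        cases hx : aRow m k rows with
        | false => rfl
        | true => exact absurd hjeq ((aRow_iff m k rows).mp hx j hj0 hjm)
      rw [hrow, Bool.and_false]
    · rw [if_neg (fun h => hbad ((bCheck_bad m k below rows hs hcnt).mp h))]
      have hstep : (if m > 0 then bInsert m below else below).Pairwise (· ≥ ·) ∧
          ∀ j : Int, 0 ≤ j → cnt (if m > 0 then bInsert m below else below) j = cnt (m :: rows) j := by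
        split_ifs with hm
        · refine ⟨sorted_bInsert m below hs, ?_⟩
          intro j hj
          rw [cnt_bInsert, cnt_cons, hcnt j hj]
        · refine ⟨hs, ?_⟩
          intro j hj
          rw [cnt_cons, if_neg (by omega)]
          rw [hcnt j hj]
          ring
      rw [ih (m :: rows) _ hstep.1 hstep.2]
      have hrow : aRow m k rows = true := by
        rw [aRow_iff]
        intro j hj0 hjm
        exact fun h => hbad ⟨j, hj0, hjm, h⟩
      rw [hrow, Bool.and_true]

-- ===== VERDICT (by name: the statement is the Claim_ definition above) =====
theorem is_core_py_spec : Claim_equal_is_core_py := by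
  intro kappa k _
  unfold Spec_is_core_py is_core_py is_core_py_alt
  rw [bGo_main k kappa [] [] (by simp) (fun _ _ => rfl), aGoX_nil_rows]
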